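-- pv_equiv track=rewrite | github.com/superplanehq/superplane | agent/evals/utils/workflow_assertions.py | _linear_path_matches
-- ===== SOURCE A (Python) =====
-- def _linear_path_matches(
--     key_to_block: dict[str, str],
--     edges: list[tuple[str, str]],
--     expected_blocks: list[str],
-- ) -> bool:
--     keys = set(key_to_block)
--     if len(keys) != len(expected_blocks) or len(edges) != len(expected_blocks) - 1:
--         return False
--     inc = {k: 0 for k in keys}
--     out = {k: 0 for k in keys}
--     for s, t in edges:
--         if s not in keys or t not in keys:
--             return False
--         out[s] += 1
--         inc[t] += 1
--     heads = [k for k in keys if inc[k] == 0]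
--     tails = [k for k in keys if out[k] == 0]
--     if len(heads) != 1 or len(tails) != 1:
--         return False
--     cur = heads[0]
--     seen: list[str] = []
--     visited: set[str] = set()
--     while cur not in visited:
--         visited.add(cur)
--         seen.append(key_to_block[cur])
--         if cur == tails[0]:
--             break
--         outs = [t for s, t in edges if s == cur]
--         if len(outs) != 1:
--             visited.add("__fail")
--             break
--         cur = outs[0]
--     return visited == keys and seen == expected_blocks
-- ===== SOURCE B (Python) =====
-- def _linear_path_matches(
--     key_to_block: dict[str, str],
--     edges: list[tuple[str, str]],
--     expected_blocks: list[str],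
-- ) -> bool:
--     keys = set(key_to_block)
--     n = len(keys)
--     if len(expected_blocks) != n or len(edges) != n - 1:
--         return False
--     # Build the successor function; a linear path has all-distinct sources
--     # and all-distinct targets, so any duplicate means no match.
--     nxt: dict[str, str] = {}
--     targets: set[str] = set()
--     for s, t in edges:
--         if s not in keys or t not in keys or s in nxt or t in targets:
--             return False
--         nxt[s] = t
--         targets.add(t)
--     # The unique node that is never a target is the head (n >= 1 here).
--     heads = keys - targets
--     order: list[str] = []
--     cur = next(iter(heads)) if len(heads) == 1 else None
--     for _ in range(n):
--         if cur is None: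
--             break
--         order.append(key_to_block[cur])
--         cur = nxt.get(cur)
--     return cur is None and order == expected_blocks
-- ===== Notes on version B (the rewrite author's own statement) =====
-- stated objective: alternative
-- what changed: A counts in/out-degrees in two dicts, validates unique head/tail, then walks rescanning the whole edge list for the successor at every step with a visited-set/'__fail' sentinel; B instead builds a successor map while rejecting duplicate sources/targets during the single edge scan, takes the unique non-target node as head, and chases the successor map at most n steps comparing the block order.
import Mathlib
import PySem

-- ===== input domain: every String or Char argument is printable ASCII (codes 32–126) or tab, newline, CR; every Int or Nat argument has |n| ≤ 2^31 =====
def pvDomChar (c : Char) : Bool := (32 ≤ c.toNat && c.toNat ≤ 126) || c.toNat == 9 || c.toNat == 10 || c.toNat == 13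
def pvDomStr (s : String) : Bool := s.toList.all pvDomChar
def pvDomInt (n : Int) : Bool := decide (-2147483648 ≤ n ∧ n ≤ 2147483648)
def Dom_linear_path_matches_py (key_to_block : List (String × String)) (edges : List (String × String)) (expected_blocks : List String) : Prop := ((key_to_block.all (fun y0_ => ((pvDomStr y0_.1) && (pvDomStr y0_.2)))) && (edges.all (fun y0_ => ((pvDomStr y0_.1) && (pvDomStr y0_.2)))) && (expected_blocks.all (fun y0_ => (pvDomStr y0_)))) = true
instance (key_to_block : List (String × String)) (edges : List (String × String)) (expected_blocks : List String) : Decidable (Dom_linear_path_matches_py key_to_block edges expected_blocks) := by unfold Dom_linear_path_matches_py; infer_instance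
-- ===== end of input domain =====

-- B replaces A's degree-counter dicts + tail-guarded cursor walk by a successor map built with
-- duplicate detection and a bounded chase from the unique non-target node (objective: alternative).

-- ===== PORT A =====

-- dict[str,str] indexing (first match per the association-list convention); both Pythons
-- index key_to_block only with keys proven present, so the default is never returned.
def pvLookup (k2b : List (String × String)) (k : String) : String :=
  match k2b.find? (fun p => p.1 == k) with
  | some p => p.2
  | none => ""

-- the 'for s, t in edges' loop of A: membership check, then out[s] += 1; inc[t] += 1
def pvA_scan : List (String × String) → PySem.Set String → PySem.Dict String Int → PySem.Dict String Int → Option (PySem.Dict String Int × PySem.Dict String Int)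
  | [], _, inc, outd => some (inc, outd)
  | (s, t) :: rest, keys, inc, outd =>
    if !(PySem.Set.contains keys s) || !(PySem.Set.contains keys t) then none
    else pvA_scan rest keys (PySem.Dict.modify inc t 0 (· + 1)) (PySem.Dict.modify outd s 0 (· + 1))

-- A's 'while cur not in visited' loop; fuel keys.length + 1 suffices: every iteration that
-- enters the body adds a fresh element of keys to visited (cur always lies in keys there)
def pvA_walk (k2b edges : List (String × String)) (tail : String) : Nat → String → PySem.Set String → List String → PySem.Set String × List String
  | 0, _, visited, seen => (visited, seen)
  | fuel + 1, cur, visited, seen =>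
    if PySem.Set.contains visited cur then (visited, seen)
    else
      let visited' := PySem.Set.add visited cur
      let seen' := seen ++ [pvLookup k2b cur]
      if cur == tail then (visited', seen')
      else
        match (edges.filter (fun e => e.1 == cur)).map (fun e => e.2) with
        | [t] => pvA_walk k2b edges tail fuel t visited' seen'
        | _ => (PySem.Set.add visited' "__fail", seen')

def linear_path_matches_py (key_to_block : List (String × String)) (edges : List (String × String)) (expected_blocks : List String) : Bool :=
  let keys : PySem.Set String := PySem.Set.ofList (key_to_block.map (fun p => p.1))
  if PySem.Set.len keys != (expected_blocks.length : Int) || (edges.length : Int) != (expected_blocks.length : Int) - 1 then false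
  else
    let inc0 : PySem.Dict String Int := PySem.Dict.ofList (keys.map (fun k => (k, 0)))
    let out0 : PySem.Dict String Int := PySem.Dict.ofList (keys.map (fun k => (k, 0)))
    match pvA_scan edges keys inc0 out0 with
    | none => false
    | some (inc, outd) =>
      let heads := keys.filter (fun k => PySem.Dict.getD inc k 0 == 0)
      let tails := keys.filter (fun k => PySem.Dict.getD outd k 0 == 0)
      if heads.length != 1 || tails.length != 1 then false
      else
        let res := pvA_walk key_to_block edges (tails.headD "") (keys.length + 1) (heads.headD "") PySem.Set.empty []
        PySem.Set.equal res.1 keys && res.2 == expected_blocks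

-- ===== PORT B =====

-- B's edge loop: reject unknown endpoints, duplicate sources and duplicate targets while
-- building the successor map nxt and the target set
def pvB_scan : List (String × String) → PySem.Set String → PySem.Dict String String → PySem.Set String → Option (PySem.Dict String String × PySem.Set String)
  | [], _, nxt, tset => some (nxt, tset)
  | (s, t) :: rest, keys, nxt, tset =>
    if !(PySem.Set.contains keys s) || !(PySem.Set.contains keys t) || PySem.Dict.contains nxt s || PySem.Set.contains tset t then none
    else pvB_scan rest keys (PySem.Dict.insert nxt s t) (PySem.Set.add tset t)

-- B's 'for _ in range(n)' chase of the successor map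
def pvB_follow (k2b : List (String × String)) (nxt : PySem.Dict String String) : Nat → Option String → List String → Option String × List String
  | 0, cur, order => (cur, order)
  | fuel + 1, cur, order =>
    match cur with
    | none => (none, order)
    | some c => pvB_follow k2b nxt fuel (PySem.Dict.get? nxt c) (order ++ [pvLookup k2b c])

def linear_path_matches_py_alt (key_to_block : List (String × String)) (edges : List (String × String)) (expected_blocks : List String) : Bool :=
  let keys : PySem.Set String := PySem.Set.ofList (key_to_block.map (fun p => p.1))
  let n := keys.length
  if (expected_blocks.length : Int) != (n : Int) || (edges.length : Int) != (n : Int) - 1 then false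
  else
    match pvB_scan edges keys PySem.Dict.empty PySem.Set.empty with
    | none => false
    | some (nxt, targets) =>
      let heads := PySem.Set.diff keys targets
      let cur0 : Option String := match heads with | [h] => some h | _ => none
      let res := pvB_follow key_to_block nxt n cur0 []
      res.1 == none && res.2 == expected_blocks

-- ===== PRECONDITION & SPEC =====
def Spec_linear_path_matches_py (key_to_block : List (String × String)) (edges : List (String × String)) (expected_blocks : List String) (out : Bool) : Prop := out = linear_path_matches_py_alt key_to_block edges expected_blocks
instance (key_to_block : List (String × String)) (edges : List (String × String)) (expected_blocks : List String) (out : Bool) : Decidable (Spec_linear_path_matches_py key_to_block edges expected_blocks out) := by unfold Spec_linear_path_matches_py; infer_instance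

-- ===== CLAIM (what is proved, stated in full; the proofs are below) =====
def Claim_equal_linear_path_matches_py : Prop := ∀ (key_to_block : List (String × String)) (edges : List (String × String)) (expected_blocks : List String), Dom_linear_path_matches_py key_to_block edges expected_blocks → Spec_linear_path_matches_py key_to_block edges expected_blocks (linear_path_matches_py key_to_block edges expected_blocks)

-- ===== LEMMAS AND PROOFS =====

-- ---- A's edge scan ----
theorem pvA_scan_none (edges : List (String × String)) (keys : PySem.Set String)
    (inc outd : PySem.Dict String Int)
    (h : ∃ e ∈ edges, e.1 ∉ keys ∨ e.2 ∉ keys) :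
    pvA_scan edges keys inc outd = none := by
  induction edges generalizing inc outd with
  | nil => simp at h
  | cons e rest ih =>
    obtain ⟨s, t⟩ := e
    by_cases hs : (!(PySem.Set.contains keys s) || !(PySem.Set.contains keys t)) = true
    · simp only [pvA_scan]; rw [if_pos hs]
    · have hs' : PySem.Set.contains keys s = true ∧ PySem.Set.contains keys t = true := by
        simpa using hs
      simp only [pvA_scan, hs, if_neg, Bool.not_eq_true] at *
      rcases h with ⟨e, he, hbad⟩
      rcases List.mem_cons.mp he with rfl | hmem
      · rcases hbad with hb | hb
        · exact absurd ((PySem.Set.contains_iff keys s).mp hs'.1) hb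
        · exact absurd ((PySem.Set.contains_iff keys t).mp hs'.2) hb
      · exact ih _ _ ⟨e, hmem, hbad⟩

theorem pvA_scan_some (edges : List (String × String)) (keys : PySem.Set String)
    (inc outd : PySem.Dict String Int)
    (h : ∀ e ∈ edges, e.1 ∈ keys ∧ e.2 ∈ keys) :
    pvA_scan edges keys inc outd =
      some ((edges.map (fun e => e.2)).foldl (fun d t => d.modify t 0 (· + 1)) inc,
            (edges.map (fun e => e.1)).foldl (fun d s => d.modify s 0 (· + 1)) outd) := by
  induction edges generalizing inc outd with
  | nil => simp [pvA_scan]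
  | cons e rest ih =>
    obtain ⟨s, t⟩ := e
    have hs := (h (s, t) (List.mem_cons_self)).1
    have ht := (h (s, t) (List.mem_cons_self)).2
    have hcs : PySem.Set.contains keys s = true := (PySem.Set.contains_iff keys s).mpr hs
    have hct : PySem.Set.contains keys t = true := (PySem.Set.contains_iff keys t).mpr ht
    simp only [pvA_scan, hcs, hct, Bool.not_true, Bool.or_self, Bool.false_eq_true, if_false,
      List.map_cons, List.foldl_cons]
    exact ih _ _ (fun e he => h e (List.mem_cons_of_mem _ he))

-- all-zero initial dict {k: 0 for k in keys}
theorem pv_getD_zero_init (K : List String) (k : String) :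
    (PySem.Dict.ofList (K.map (fun k => (k, (0 : Int))))).getD k 0 = 0 := by
  suffices h : ∀ (d : PySem.Dict String Int), (∀ k', d.getD k' 0 = 0) →
      ((K.map (fun k => (k, (0 : Int)))).foldl (fun d p => d.insert p.1 p.2) d).getD k 0 = 0 by
    have := h PySem.Dict.empty (fun k' => by simp [PySem.Dict.getD_eq_get?_getD])
    simpa [PySem.Dict.ofList] using this
  induction K with
  | nil => intro d hd; simpa using hd k
  | cons a rest ih =>
    intro d hd
    simp only [List.map_cons, List.foldl_cons]
    exact ih _ (fun k' => by rw [PySem.Dict.getD_insert]; split <;> simp [hd])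

-- ---- B's edge scan ----
theorem pvB_scan_none_bad (edges : List (String × String)) (keys : PySem.Set String)
    (nxt : PySem.Dict String String) (tset : PySem.Set String)
    (h : ∃ e ∈ edges, e.1 ∉ keys ∨ e.2 ∉ keys) :
    pvB_scan edges keys nxt tset = none := by
  induction edges generalizing nxt tset with
  | nil => simp at h
  | cons e rest ih =>
    obtain ⟨s, t⟩ := e
    by_cases hc : (!(PySem.Set.contains keys s) || !(PySem.Set.contains keys t)
        || PySem.Dict.contains nxt s || PySem.Set.contains tset t) = true
    · simp only [pvB_scan]; rw [if_pos hc]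
    · have hs' : PySem.Set.contains keys s = true ∧ PySem.Set.contains keys t = true := by
        simp only [Bool.or_eq_true, not_or, Bool.not_eq_true'] at hc
        constructor
        · simpa using hc.1.1.1
        · simpa using hc.1.1.2
      simp only [pvB_scan, hc, if_neg, Bool.not_eq_true] at *
      rcases h with ⟨e, he, hbad⟩
      rcases List.mem_cons.mp he with rfl | hmem
      · rcases hbad with hb | hb
        · exact absurd ((PySem.Set.contains_iff keys s).mp hs'.1) hb
        · exact absurd ((PySem.Set.contains_iff keys t).mp hs'.2) hb
      · exact ih _ _ ⟨e, hmem, hbad⟩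

theorem pvB_scan_none_dup (edges : List (String × String)) (keys : PySem.Set String)
    (nxt : PySem.Dict String String) (tset : PySem.Set String)
    (hgood : ∀ e ∈ edges, e.1 ∈ keys ∧ e.2 ∈ keys)
    (hk : nxt.keys.Nodup) (hts : tset.Nodup)
    (h : ¬ (nxt.keys ++ edges.map (fun e => e.1)).Nodup ∨ ¬ (tset ++ edges.map (fun e => e.2)).Nodup) :
    pvB_scan edges keys nxt tset = none := by
  induction edges generalizing nxt tset with
  | nil => simp [hk, hts] at h
  | cons e rest ih =>
    obtain ⟨s, t⟩ := e
    by_cases hc : (!(PySem.Set.contains keys s) || !(PySem.Set.contains keys t)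
        || PySem.Dict.contains nxt s || PySem.Set.contains tset t) = true
    · simp only [pvB_scan]; rw [if_pos hc]
    · have hcd : PySem.Dict.contains nxt s = false := by
        revert hc; cases PySem.Dict.contains nxt s <;> simp
      have hct : PySem.Set.contains tset t = false := by
        revert hc; cases PySem.Set.contains tset t <;> simp
      have hsn : s ∉ nxt.keys := fun hm => by
        rw [(PySem.Dict.contains_iff_mem_keys nxt s).mpr hm] at hcd; cases hcd
      have htn : t ∉ tset := fun hm => by
        rw [(PySem.Set.contains_iff tset t).mpr hm] at hct; cases hct
      have hk' : (nxt.insert s t).keys.Nodup := by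
        rw [PySem.Dict.keys_insert_of_not_contains _ _ hcd]
        simp only [List.nodup_append, List.nodup_singleton, true_and, hk]
        intro a ha b hb
        simp only [List.mem_singleton] at hb
        exact fun hEq => hsn ((hEq.trans hb) ▸ ha)
      have hts' : (tset ++ [t]).Nodup := by
        simp only [List.nodup_append, List.nodup_singleton, true_and, hts]
        intro a ha b hb
        simp only [List.mem_singleton] at hb
        exact fun hEq => htn ((hEq.trans hb) ▸ ha)
      have h' : ¬ ((nxt.insert s t).keys ++ rest.map (fun e => e.1)).Nodup ∨
          ¬ ((tset ++ [t]) ++ rest.map (fun e => e.2)).Nodup := by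
        rw [PySem.Dict.keys_insert_of_not_contains _ _ hcd, List.append_assoc, List.append_assoc]
        simpa using h
      simp only [pvB_scan]
      rw [if_neg hc, PySem.Set.add_of_not_mem htn]
      exact ih _ _ (fun e he => hgood e (List.mem_cons_of_mem _ he)) hk' hts' h'

theorem pvB_scan_some (edges : List (String × String)) (keys : PySem.Set String)
    (nxt : PySem.Dict String String) (tset : PySem.Set String)
    (hgood : ∀ e ∈ edges, e.1 ∈ keys ∧ e.2 ∈ keys)
    (h1 : (nxt.keys ++ edges.map (fun e => e.1)).Nodup)
    (h2 : (tset ++ edges.map (fun e => e.2)).Nodup) :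
    pvB_scan edges keys nxt tset =
      some (edges.foldl (fun d e => d.insert e.1 e.2) nxt, tset ++ edges.map (fun e => e.2)) := by
  induction edges generalizing nxt tset with
  | nil => simp [pvB_scan]
  | cons e rest ih =>
    obtain ⟨s, t⟩ := e
    have hs := (hgood (s, t) List.mem_cons_self).1
    have ht := (hgood (s, t) List.mem_cons_self).2
    simp only [List.map_cons, List.nodup_append] at h1 h2
    have hsn : s ∉ nxt.keys := fun hm =>
      h1.2.2 s hm s List.mem_cons_self rfl
    have htn : t ∉ tset := fun hm =>
      h2.2.2 t hm t List.mem_cons_self rfl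
    have hcd : PySem.Dict.contains nxt s = false := by
      rw [← Bool.not_eq_true, PySem.Dict.contains_iff_mem_keys]; exact hsn
    have hct : PySem.Set.contains tset t = false := by
      rw [← Bool.not_eq_true, PySem.Set.contains_iff]; exact htn
    have h1' : ((nxt.insert s t).keys ++ rest.map (fun e => e.1)).Nodup := by
      rw [PySem.Dict.keys_insert_of_not_contains _ _ hcd, List.append_assoc]
      simp only [List.singleton_append, List.nodup_append]
      exact h1
    have h2' : ((tset ++ [t]) ++ rest.map (fun e => e.2)).Nodup := by
      rw [List.append_assoc]
      simp only [List.singleton_append, List.nodup_append]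
      exact h2
    simp only [pvB_scan]
    rw [if_neg (by simp [hcd]; exact ⟨⟨hs, ht⟩, htn⟩)]
    rw [PySem.Set.add_of_not_mem htn]
    rw [ih _ _ (fun e he => hgood e (List.mem_cons_of_mem _ he)) h1' h2']
    simp [List.append_assoc]

theorem pv_get?_fold_insert (edges : List (String × String)) (d : PySem.Dict String String)
    (h : (d.keys ++ edges.map (fun e => e.1)).Nodup) (c : String) :
    (edges.foldl (fun d e => d.insert e.1 e.2) d).get? c =
      match edges.find? (fun e => e.1 == c) with
      | some e => some e.2
      | none => d.get? c := by
  induction edges generalizing d with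
  | nil => simp
  | cons e rest ih =>
    obtain ⟨s, t⟩ := e
    simp only [List.map_cons, List.nodup_append] at h
    have hsn : s ∉ d.keys := fun hm =>
      h.2.2 s hm s List.mem_cons_self rfl
    have hcd : d.contains s = false := by
      rw [← Bool.not_eq_true, PySem.Dict.contains_iff_mem_keys]; exact hsn
    have h' : ((d.insert s t).keys ++ rest.map (fun e => e.1)).Nodup := by
      rw [PySem.Dict.keys_insert_of_not_contains _ _ hcd, List.append_assoc]
      simp only [List.singleton_append, List.nodup_append]
      exact h
    simp only [List.foldl_cons]
    rw [ih _ h']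
    by_cases hcs : s = c
    · subst hcs
      have hfind : rest.find? (fun e => e.1 == s) = none := by
        rw [List.find?_eq_none]
        intro e he hbeq
        have hmem : e.1 ∈ rest.map (fun e => e.1) := List.mem_map_of_mem he
        rw [eq_of_beq hbeq] at hmem
        exact (List.nodup_cons.mp h.2.1).1 hmem
      simp [hfind]
    · have hpa : ((s, t).1 == c) = false := by
        simpa using fun hh => absurd hh hcs
      rw [List.find?_cons, hpa]
      cases hfind : rest.find? (fun e => e.1 == c) with
      | some e => simp
      | none =>
        simp only [PySem.Dict.get?_insert]
        rw [if_neg (fun hh => absurd hh.symm hcs)]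

theorem pvB_follow_none (k2b : List (String × String)) (nxt : PySem.Dict String String)
    (fuel : Nat) (order : List String) :
    pvB_follow k2b nxt fuel none order = (none, order) := by
  cases fuel <;> rfl

-- ---- counting: a duplicated endpoint forces ≠ 1 zero-degree keys ----
theorem pv_sum_indicator (K : List String) (a : String) :
    (K.map (fun k => if k = a then (1 : Nat) else 0)).sum = K.count a := by
  induction K with
  | nil => simp
  | cons b rest ih =>
    simp only [List.map_cons, List.sum_cons, ih, List.count_cons]
    by_cases hb : b = a
    · subst hb; simp; omega
    · have h2 : (b == a) = false := by simpa using hb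
      rw [if_neg hb, h2]
      simp

theorem pv_sum_map_add (K : List String) (f g : String → Nat) :
    (K.map (fun k => f k + g k)).sum = (K.map f).sum + (K.map g).sum := by
  induction K with
  | nil => simp
  | cons b rest ih => simp [ih]; omega

theorem pv_sum_count (xs K : List String) (hK : K.Nodup) (hsub : ∀ x ∈ xs, x ∈ K) :
    (K.map (fun k => xs.count k)).sum = xs.length := by
  induction xs with
  | nil => simp
  | cons a rest ih =>
    have ha : a ∈ K := hsub a List.mem_cons_self
    have hmap : K.map (fun k => (a :: rest).count k)
        = K.map (fun k => rest.count k + if k = a then 1 else 0) := by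
      apply List.map_congr_left
      intro k _
      rw [List.count_cons]
      by_cases h : k = a
      · simp [h]
      · have h2 : (a = k) = False := by simpa using fun hh => h hh.symm
        simp [h, h2]
    rw [hmap, pv_sum_map_add, pv_sum_indicator,
      ih (fun x hx => hsub x (List.mem_cons_of_mem _ hx)),
      List.count_eq_one_of_mem hK ha]
    simp

theorem pv_filter_le_sum (K : List String) (f : String → Nat) :
    (K.filter (fun k => f k != 0)).length ≤ (K.map f).sum := by
  induction K with
  | nil => simp
  | cons b rest ih =>
    by_cases hb : f b = 0 <;> simp [hb] <;> omega

theorem pv_dup_filter_ne_one (K xs : List String) (hK : K.Nodup)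
    (hsub : ∀ x ∈ xs, x ∈ K) (hlen : xs.length + 1 = K.length) (hdup : ¬ xs.Nodup) :
    (K.filter (fun k => xs.count k == 0)).length ≠ 1 := by
  obtain ⟨s0, hs0⟩ := List.exists_duplicate_iff_not_nodup.mpr hdup
  have hcnt : 2 ≤ xs.count s0 := List.duplicate_iff_two_le_count.mp hs0
  have hs0K : s0 ∈ K := hsub s0 hs0.mem
  have hperm : K.Perm (s0 :: K.erase s0) := List.perm_cons_erase hs0K
  have hsum : (K.map (fun k => xs.count k)).sum = xs.length := pv_sum_count xs K hK hsub
  have hsum2 : (K.map (fun k => xs.count k)).sum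
      = xs.count s0 + ((K.erase s0).map (fun k => xs.count k)).sum := by
    rw [(hperm.map (fun k => xs.count k)).sum_eq]
    simp
  have hfilperm := hperm.filter (fun k => xs.count k != 0)
  have hlenf : (K.filter (fun k => xs.count k != 0)).length
      = 1 + ((K.erase s0).filter (fun k => xs.count k != 0)).length := by
    rw [hfilperm.length_eq, List.filter_cons]
    have : (xs.count s0 != 0) = true := by simp; omega
    simp [this]
    omega
  have h3 : ((K.erase s0).filter (fun k => xs.count k != 0)).length
      ≤ ((K.erase s0).map (fun k => xs.count k)).sum := pv_filter_le_sum _ _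
  have hsplit : (K.filter (fun k => xs.count k == 0)).length
      + (K.filter (fun k => xs.count k != 0)).length = K.length := by
    have := (List.length_eq_length_filter_add (l := K) (fun k => xs.count k == 0)).symm
    simpa [bne] using this
  omega

-- ---- C3 helpers: distinct sources/targets make the walk functional ----
theorem pv_filter_mem_length (K T : List String) (hK : K.Nodup) (hT : T.Nodup)
    (hsub : ∀ t ∈ T, t ∈ K) :
    (K.filter (fun k => decide (k ∈ T))).length = T.length := by
  have hperm : (K.filter (fun k => decide (k ∈ T))).Perm T := by
    rw [List.perm_ext_iff_of_nodup (hK.filter _) hT]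
    intro a
    simp only [List.mem_filter, decide_eq_true_eq]
    exact ⟨fun h => h.2, fun h => ⟨hsub a h, h⟩⟩
  exact hperm.length_eq

theorem pv_eq_of_snd_eq (edges : List (String × String))
    (hT : (edges.map (fun e => e.2)).Nodup) :
    ∀ e ∈ edges, ∀ e' ∈ edges, e.2 = e'.2 → e = e' := by
  induction edges with
  | nil => simp
  | cons e0 rest ih =>
    simp only [List.map_cons, List.nodup_cons] at hT
    intro e he e' he' hsnd
    rcases List.mem_cons.mp he with he0 | heR <;> rcases List.mem_cons.mp he' with he0' | heR'
    · rw [he0, he0']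
    · exact absurd (by rw [← he0, hsnd]; exact List.mem_map_of_mem heR') hT.1
    · exact absurd (by rw [← he0', ← hsnd]; exact List.mem_map_of_mem heR) hT.1
    · exact ih hT.2 e heR e' heR' hsnd

theorem pv_filter_src_none (edges : List (String × String)) (c : String)
    (hc : c ∉ edges.map (fun e => e.1)) :
    edges.filter (fun e => e.1 == c) = [] ∧ edges.find? (fun e => e.1 == c) = none := by
  constructor
  · rw [List.filter_eq_nil_iff]
    intro e he
    simpa using fun h => hc (by rw [← h]; exact List.mem_map_of_mem he)
  · rw [List.find?_eq_none]
    intro e he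
    simpa using fun h => hc (by rw [← h]; exact List.mem_map_of_mem he)

theorem pv_filter_src (edges : List (String × String))
    (hS : (edges.map (fun e => e.1)).Nodup) (c : String) (hc : c ∈ edges.map (fun e => e.1)) :
    ∃ t, edges.find? (fun e => e.1 == c) = some (c, t) ∧
      edges.filter (fun e => e.1 == c) = [(c, t)] := by
  induction edges with
  | nil => simp at hc
  | cons e0 rest ih =>
    obtain ⟨s0, t0⟩ := e0
    simp only [List.map_cons, List.nodup_cons] at hS
    by_cases h0 : s0 = c
    · subst h0
      have hrest : s0 ∉ rest.map (fun e => e.1) := hS.1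
      refine ⟨t0, ?_, ?_⟩
      · rw [List.find?_cons]
        simp
      · rw [List.filter_cons]
        simp only [beq_self_eq_true, if_true]
        have : rest.filter (fun e => e.1 == s0) = [] := (pv_filter_src_none rest s0 hrest).1
        simp [this]
    · have hc' : c ∈ rest.map (fun e => e.1) := by
        rcases List.mem_cons.mp hc with h | h
        · exact absurd h.symm h0
        · exact h
      obtain ⟨t, hf, hfil⟩ := ih hS.2 hc'
      have hpa : ((s0, t0).1 == c) = false := by simpa using h0
      refine ⟨t, ?_, ?_⟩
      · rw [List.find?_cons, hpa, hf]
      · rw [List.filter_cons, hpa]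
        simpa using hfil

-- ---- the two walks, simulated together ----
theorem pv_walk (k2b edges : List (String × String)) (K : List String) (t0 : String)
    (nxt : PySem.Dict String String)
    (hS : (edges.map (fun e => e.1)).Nodup)
    (hT : (edges.map (fun e => e.2)).Nodup)
    (hsub : ∀ e ∈ edges, e.1 ∈ K ∧ e.2 ∈ K)
    (htails : ∀ k ∈ K, (k ∉ edges.map (fun e => e.1) ↔ k = t0))
    (hnxt : ∀ c, nxt.get? c = match edges.find? (fun e => e.1 == c) with
      | some e => some e.2 | none => none)
    (fA : Nat) :
    ∀ (fB : Nat) (cur : String) (acc seen : List String),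
    cur ∈ K → acc.Nodup → (∀ a ∈ acc, a ∈ K) → cur ∉ acc →
    (∀ e ∈ edges, e.2 ∈ acc → e.1 ∈ acc) →
    (∀ e ∈ edges, e.2 = cur → e.1 ∈ acc) →
    K.length ≤ acc.length + fA → K.length ≤ acc.length + fB →
    ∃ ch, ch ≠ [] ∧ (acc ++ ch).Nodup ∧ (∀ x ∈ ch, x ∈ K) ∧
      pvA_walk k2b edges t0 fA cur acc seen = (acc ++ ch, seen ++ ch.map (pvLookup k2b)) ∧
      pvB_follow k2b nxt fB (some cur) seen = (none, seen ++ ch.map (pvLookup k2b)) := by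
  induction fA with
  | zero =>
    intro fB cur acc seen hcurK haccN haccK hcura _ _ hfa _
    exfalso
    have hsubK : (cur :: acc).Subperm K :=
      (List.nodup_cons.mpr ⟨hcura, haccN⟩).subperm
        (fun x hx => by rcases List.mem_cons.mp hx with rfl | hx; exacts [hcurK, haccK x hx])
    have := hsubK.length_le
    simp at this
    omega
  | succ fA ih =>
    intro fB cur acc seen hcurK haccN haccK hcura hclosed hpred hfa hfb
    have hsubK : (cur :: acc).Subperm K :=
      (List.nodup_cons.mpr ⟨hcura, haccN⟩).subperm
        (fun x hx => by rcases List.mem_cons.mp hx with rfl | hx; exacts [hcurK, haccK x hx])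
    have hlt : acc.length + 1 ≤ K.length := by
      have := hsubK.length_le; simpa using this
    obtain ⟨fB', rfl⟩ : ∃ fB', fB = fB' + 1 := ⟨fB - 1, by omega⟩
    have hadd : PySem.Set.add acc cur = acc ++ [cur] := PySem.Set.add_of_not_mem hcura
    by_cases hct : cur = t0
    · subst hct
      have hnoS : cur ∉ edges.map (fun e => e.1) := (htails cur hcurK).mpr rfl
      have hfind := (pv_filter_src_none edges cur hnoS).2
      refine ⟨[cur], by simp, ?_, by simpa using hcurK, ?_, ?_⟩
      · simp only [List.nodup_append, List.nodup_singleton, true_and, haccN]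
        intro a ha b hb
        simp only [List.mem_singleton] at hb
        exact fun hEq => hcura ((hEq.trans hb) ▸ ha)
      · simp only [pvA_walk]
        rw [if_neg (by simpa using hcura), if_pos (by simp), hadd]
        simp
      · simp only [pvB_follow]
        rw [hnxt cur, hfind]
        exact pvB_follow_none k2b nxt fB' _
    · have hcurS : cur ∈ edges.map (fun e => e.1) := by
        by_contra h
        exact hct ((htails cur hcurK).mp h)
      obtain ⟨t, hfind, hfil⟩ := pv_filter_src edges hS cur hcurS
      have hmemE : (cur, t) ∈ edges := by
        have : (cur, t) ∈ edges.filter (fun e => e.1 == cur) := by rw [hfil]; simp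
        exact List.mem_of_mem_filter this
      have htK : t ∈ K := (hsub _ hmemE).2
      have htnew : t ∉ acc ++ [cur] := by
        intro hmem
        rcases List.mem_append.mp hmem with hmem | hmem
        · exact hcura (hclosed (cur, t) hmemE hmem)
        · simp only [List.mem_singleton] at hmem
          exact hcura (hpred (cur, t) hmemE hmem)
      obtain ⟨ch', hne', hnd', hchK', hA', hB'⟩ :=
        ih fB' t (acc ++ [cur]) (seen ++ [pvLookup k2b cur]) htK
          (by simp only [List.nodup_append, List.nodup_singleton, true_and, haccN]
              intro a ha b hb
              simp only [List.mem_singleton] at hb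
              exact fun hEq => hcura ((hEq.trans hb) ▸ ha))
          (fun a ha => by
            rcases List.mem_append.mp ha with ha | ha
            · exact haccK a ha
            · simp only [List.mem_singleton] at ha; exact ha ▸ hcurK)
          htnew
          (fun e he h2 => by
            rcases List.mem_append.mp h2 with h2 | h2
            · exact List.mem_append_left _ (hclosed e he h2)
            · simp only [List.mem_singleton] at h2
              exact List.mem_append_left _ (hpred e he h2))
          (fun e he h2 => by
            have : e = (cur, t) := pv_eq_of_snd_eq edges hT e he (cur, t) hmemE h2
            rw [this]
            exact List.mem_append_right _ (by simp))
          (by simp; omega) (by simp; omega)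
      refine ⟨cur :: ch', by simp, ?_, ?_, ?_, ?_⟩
      · simpa [List.append_assoc] using hnd'
      · intro x hx
        rcases List.mem_cons.mp hx with rfl | hx
        · exact hcurK
        · exact hchK' x hx
      · simp only [pvA_walk]
        rw [if_neg (by simpa using hcura), if_neg (by simpa using hct), hadd, hfil]
        simpa [List.append_assoc] using hA'
      · simp only [pvB_follow]
        rw [hnxt cur, hfind]
        simpa [List.append_assoc] using hB'

theorem pv_main (key_to_block edges : List (String × String)) (expected_blocks : List String) :
    linear_path_matches_py key_to_block edges expected_blocks = linear_path_matches_py_alt key_to_block edges expected_blocks := by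
  simp only [linear_path_matches_py, linear_path_matches_py_alt]
  set K : PySem.Set String := PySem.Set.ofList (key_to_block.map (fun p => p.1)) with hKdef
  have hKnd : K.Nodup := PySem.Set.nodup_ofList _
  set S := edges.map (fun e => e.1) with hSdef
  set T := edges.map (fun e => e.2) with hTdef
  by_cases h1 : (PySem.Set.len K != (expected_blocks.length : Int) || (edges.length : Int) != (expected_blocks.length : Int) - 1) = true
  · rw [if_pos h1]
    have h2 : (((expected_blocks.length : Int) != (K.length : Int)) || ((edges.length : Int) != (K.length : Int) - 1)) = true := by
      revert h1
      simp only [PySem.Set.len, Bool.or_eq_true, bne_iff_ne, ne_eq]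
      omega
    rw [if_pos h2]
  · rw [if_neg h1]
    have hsz : (K.length : Int) = (expected_blocks.length : Int) ∧ (edges.length : Int) = (expected_blocks.length : Int) - 1 := by
      revert h1
      simp only [PySem.Set.len, Bool.or_eq_true, bne_iff_ne, ne_eq]
      omega
    have h2 : (((expected_blocks.length : Int) != (K.length : Int)) || ((edges.length : Int) != (K.length : Int) - 1)) = false := by
      simp only [Bool.or_eq_false_iff, bne_eq_false_iff_eq]
      omega
    rw [if_neg (by simp [h2])]
    have hEn : expected_blocks.length = K.length := by omega
    have hMn : edges.length + 1 = K.length := by omega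
    by_cases hgood : ∀ e ∈ edges, e.1 ∈ K ∧ e.2 ∈ K
    · -- every endpoint is a key
      have hsubS : ∀ x ∈ S, x ∈ K := by
        intro x hx
        obtain ⟨e, he, rfl⟩ := List.mem_map.mp hx
        exact (hgood e he).1
      have hsubT : ∀ x ∈ T, x ∈ K := by
        intro x hx
        obtain ⟨e, he, rfl⟩ := List.mem_map.mp hx
        exact (hgood e he).2
      have hlenS : S.length = edges.length := List.length_map ..
      have hlenT : T.length = edges.length := List.length_map ..
      rw [pvA_scan_some edges K _ _ hgood]
      dsimp only
      rw [← hSdef, ← hTdef]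
      have hheads : K.filter (fun k => PySem.Dict.getD
            (T.foldl (fun d t => d.modify t 0 (· + 1)) (PySem.Dict.ofList (K.map (fun k => (k, (0 : Int)))))) k 0 == 0)
          = K.filter (fun k => T.count k == 0) := by
        apply List.filter_congr
        intro k _
        rw [PySem.Dict.getD_foldl_modify_add_one T (PySem.Dict.ofList (K.map (fun k => (k, (0 : Int))))) k,
          pv_getD_zero_init]
        simp
      have htls : K.filter (fun k => PySem.Dict.getD
            (S.foldl (fun d t => d.modify t 0 (· + 1)) (PySem.Dict.ofList (K.map (fun k => (k, (0 : Int)))))) k 0 == 0)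
          = K.filter (fun k => S.count k == 0) := by
        apply List.filter_congr
        intro k _
        rw [PySem.Dict.getD_foldl_modify_add_one S (PySem.Dict.ofList (K.map (fun k => (k, (0 : Int))))) k,
          pv_getD_zero_init]
        simp
      rw [hheads, htls]
      by_cases hSnd : S.Nodup
      · by_cases hTnd : T.Nodup
        · -- C3: a genuine candidate path; both sides walk it
          have hBsome := pvB_scan_some edges K PySem.Dict.empty PySem.Set.empty hgood
            (by simpa [PySem.Dict.keys_empty] using hSnd)
            (by simpa [PySem.Set.empty] using hTnd)
          rw [hBsome]
          dsimp only
          have hempT : (PySem.Set.empty : PySem.Set String) ++ List.map (fun e => e.2) edges = T := by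
            rw [hTdef]; simp [PySem.Set.empty]
          rw [hempT]
          have hconvT : K.filter (fun k => List.count k T == 0)
              = K.filter (fun k => !(decide (k ∈ T))) := by
            apply List.filter_congr
            intro k _
            by_cases h : k ∈ T <;> simp [h, List.count_eq_zero]
          have hconvS : K.filter (fun k => List.count k S == 0)
              = K.filter (fun k => !(decide (k ∈ S))) := by
            apply List.filter_congr
            intro k _
            by_cases h : k ∈ S <;> simp [h, List.count_eq_zero]
          have hheads1 : (K.filter (fun k => List.count k T == 0)).length = 1 := by
            rw [hconvT]
            have hsplit := List.length_eq_length_filter_add (l := K) (fun k => decide (k ∈ T))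
            have hmem := pv_filter_mem_length K T hKnd hTnd hsubT
            omega
          have htails1 : (K.filter (fun k => List.count k S == 0)).length = 1 := by
            rw [hconvS]
            have hsplit := List.length_eq_length_filter_add (l := K) (fun k => decide (k ∈ S))
            have hmem := pv_filter_mem_length K S hKnd hSnd hsubS
            omega
          obtain ⟨h0, hheadsEq⟩ := List.length_eq_one_iff.mp hheads1
          obtain ⟨t0, htailsEq⟩ := List.length_eq_one_iff.mp htails1
          have hh0 : h0 ∈ K ∧ h0 ∉ T := by
            have : h0 ∈ K.filter (fun k => List.count k T == 0) := by
              rw [hheadsEq]; exact List.mem_cons_self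
            simpa [List.mem_filter, List.count_eq_zero] using this
          have htchar : ∀ k ∈ K, (k ∉ S ↔ k = t0) := by
            intro k hk
            constructor
            · intro hns
              have : k ∈ K.filter (fun k => List.count k S == 0) := by
                simp [List.mem_filter, List.count_eq_zero, hk, hns]
              rw [htailsEq] at this
              simpa using this
            · intro hkt
              subst hkt
              have : k ∈ K.filter (fun kk => List.count kk S == 0) := by
                rw [htailsEq]; exact List.mem_cons_self
              simp [List.mem_filter, List.count_eq_zero] at this
              exact this.2
          have hdiff : PySem.Set.diff K T = K.filter (fun k => List.count k T == 0) := by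
            show K.filter _ = _
            rw [hconvT]
            apply List.filter_congr
            intro k _
            simp
          have hnxt : ∀ c, (edges.foldl (fun d e => d.insert e.1 e.2) PySem.Dict.empty).get? c
              = match edges.find? (fun e => e.1 == c) with
                | some e => some e.2 | none => none := by
            intro c
            rw [pv_get?_fold_insert edges PySem.Dict.empty
              (by simpa [PySem.Dict.keys_empty] using hSnd) c]
            cases edges.find? (fun e => e.1 == c) <;> simp
          obtain ⟨ch, hchne, hchnd, hchK, hA, hB⟩ :=
            pv_walk key_to_block edges K t0 _ hSnd hTnd hgood htchar hnxt
              (List.length K + 1) (List.length K) h0 [] []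
              hh0.1 List.nodup_nil (by simp) (by simp)
              (by simp) (fun e he h2 => absurd (by rw [← h2]; exact List.mem_map_of_mem he) hh0.2)
              (by simp) (by simp)
          rw [hheadsEq, htailsEq, hdiff, hheadsEq]
          dsimp only [List.headD]
          rw [if_neg (by simp)]
          have hA' : pvA_walk key_to_block edges t0 (List.length K + 1) h0 PySem.Set.empty []
              = (ch, ch.map (pvLookup key_to_block)) := by
            simpa [PySem.Set.empty] using hA
          have hB' : pvB_follow key_to_block (edges.foldl (fun d e => d.insert e.1 e.2) PySem.Dict.empty)
              (List.length K) (some h0) [] = (none, ch.map (pvLookup key_to_block)) := by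
            simpa using hB
          rw [hA', hB']
          dsimp only
          cases hEq : (ch.map (pvLookup key_to_block) == expected_blocks) with
          | false => simp
          | true =>
            have hchlen : ch.length = List.length K := by
              have := congrArg List.length (eq_of_beq hEq)
              simp only [List.length_map] at this
              omega
            have hchndup : ch.Nodup := by simpa using hchnd
            have hperm : ch.Perm K :=
              (hchndup.subperm hchK).perm_of_length_le (by omega)
            have hset : PySem.Set.equal ch K = true :=
              (PySem.Set.equal_iff ch K).mpr (fun x => hperm.mem_iff)
            simp [hset]
        · -- C2: duplicated target: A sees ≠ 1 heads, B rejects in the scan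
          have hA1 : (K.filter (fun k => T.count k == 0)).length ≠ 1 :=
            pv_dup_filter_ne_one K T hKnd hsubT (by omega) hTnd
          rw [pvB_scan_none_dup edges K PySem.Dict.empty PySem.Set.empty hgood
            (by simp [PySem.Dict.keys_empty]) (by simp [PySem.Set.empty])
            (Or.inr (by simpa [PySem.Set.empty] using hTnd))]
          rw [if_pos (by simp only [Bool.or_eq_true, bne_iff_ne, ne_eq]; exact Or.inl hA1)]
      · -- C1: duplicated source: A sees ≠ 1 tails, B rejects in the scan
        have hA1 : (K.filter (fun k => S.count k == 0)).length ≠ 1 :=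
          pv_dup_filter_ne_one K S hKnd hsubS (by omega) hSnd
        rw [pvB_scan_none_dup edges K PySem.Dict.empty PySem.Set.empty hgood
          (by simp [PySem.Dict.keys_empty]) (by simp [PySem.Set.empty])
          (Or.inl (by simpa [PySem.Dict.keys_empty] using hSnd))]
        rw [if_pos (by simp only [Bool.or_eq_true, bne_iff_ne, ne_eq]; exact Or.inr hA1)]
    · -- some edge endpoint is not a key: both scans fail
      push Not at hgood
      obtain ⟨e, he, hbad⟩ := hgood
      have hbad' : e.1 ∉ K ∨ e.2 ∉ K := by tauto
      rw [pvA_scan_none edges K _ _ ⟨e, he, hbad'⟩,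
        pvB_scan_none_bad edges K _ _ ⟨e, he, hbad'⟩]

-- ===== VERDICT (by name: the statement is the Claim_ definition above) =====
theorem linear_path_matches_py_spec : Claim_equal_linear_path_matches_py := by
  intro k e x _
  exact pv_main k e x
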